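-- pv_equiv track=rewrite | github.com/SovithKothari/Maximl_technical_question | smallest_substring.py | max_chars
-- ===== SOURCE A (Python) =====
-- TOTAL_CHARS = 256
--
-- def max_chars(text, n):
--
--     # Initialize all count of characters to 0
--     count = [0] * TOTAL_CHARS
--     # Check for Character count
--     for i in range(n):
--         count[ord(text[i])] += 1
--     max_distinct = 0
--     for i in range(TOTAL_CHARS):
--         if (count[i] != 0):
--             max_distinct += 1
--     return max_distinct
-- ===== SOURCE B (Python) =====
-- def max_chars(text, n):
--     # sort the first n characters, then count run boundaries in one scan
--     chars = sorted(text[i] for i in range(n))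
--     distinct = 0
--     prev = None
--     for c in chars:
--         if c != prev:
--             distinct += 1
--             prev = c
--     return distinct
-- ===== Notes on version B (the rewrite author's own statement) =====
-- stated objective: alternative
-- what changed: Replaces the 256-slot count array filled then scanned with a sort-then-scan: sort the first n characters and count run boundaries (adjacent unequal pairs) in one pass over the sorted list.
import Mathlib
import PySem

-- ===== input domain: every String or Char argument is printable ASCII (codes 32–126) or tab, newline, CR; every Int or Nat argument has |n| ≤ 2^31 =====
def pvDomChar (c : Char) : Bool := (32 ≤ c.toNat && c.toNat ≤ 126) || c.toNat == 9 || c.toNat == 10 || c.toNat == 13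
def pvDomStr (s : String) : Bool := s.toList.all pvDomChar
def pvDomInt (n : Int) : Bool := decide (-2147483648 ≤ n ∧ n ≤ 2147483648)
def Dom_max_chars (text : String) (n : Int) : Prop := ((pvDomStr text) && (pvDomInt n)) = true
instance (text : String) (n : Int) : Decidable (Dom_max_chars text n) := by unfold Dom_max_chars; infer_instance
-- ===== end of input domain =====

set_option maxRecDepth 8192


-- B replaces A's fill-a-256-slot-count-array-then-scan-all-256-slots with sort-then-scan:
-- sort the first n characters and count run boundaries in one pass (alternative decomposition, not faster).

-- ===== PORT A =====
def max_chars (text : String) (n : Int) : Int :=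
  let count : List Int := (PySem.List.pyRange 0 n 1).foldl
    (fun count i =>
      let o : Int := ((PySem.List.pyGetD text.toList i ' ').toNat : Int)
      PySem.List.pySetD count o (PySem.List.pyGetD count o 0 + 1))
    (List.replicate 256 0)
  (PySem.List.pyRange 0 256 1).foldl
    (fun m i => if PySem.List.pyGetD count i 0 ≠ 0 then m + 1 else m) 0

-- ===== PORT B =====
def max_chars_alt (text : String) (n : Int) : Int :=
  let chars : List Char := PySem.List.sorted
    ((PySem.List.pyRange 0 n 1).map (fun i => PySem.List.pyGetD text.toList i ' '))
    (fun c => c) false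
  (chars.foldl
    (fun (st : Int × Option Char) c =>
      if some c ≠ st.2 then (st.1 + 1, some c) else st)
    (0, none)).1

-- ===== PRECONDITION & SPEC =====
-- A raises IndexError (text[i]) exactly when n > len(text); Pre_ excludes those inputs.
def Pre_max_chars (text : String) (n : Int) : Prop := n ≤ (text.toList.length : Int)
instance (text : String) (n : Int) : Decidable (Pre_max_chars text n) := by
  unfold Pre_max_chars; infer_instance
def pvWitness_max_chars : String × Int := ("ab", 2)
def Spec_max_chars (text : String) (n : Int) (out : Int) : Prop := out = max_chars_alt text n
instance (text : String) (n : Int) (out : Int) : Decidable (Spec_max_chars text n out) := by unfold Spec_max_chars; infer_instance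

-- ===== CLAIM (what is proved, stated in full; the proofs are below) =====
def Claim_equal_max_chars : Prop := ∀ (text : String) (n : Int), Dom_max_chars text n → Pre_max_chars text n → Spec_max_chars text n (max_chars text n)

-- ===== LEMMAS AND PROOFS =====

-- the per-character step of A's first loop (after the index is resolved to a character)
def pvAStep (count : List Int) (c : Char) : List Int :=
  PySem.List.pySetD count ((c.toNat : Int)) (PySem.List.pyGetD count ((c.toNat : Int)) 0 + 1)

-- the per-character step of B's scan over the sorted list
def pvBStep (st : Int × Option Char) (c : Char) : Int × Option Char :=
  if some c ≠ st.2 then (st.1 + 1, some c) else st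

-- a loop 'for i in range(n): … xs[i] …' with n ≤ len xs is a fold over the first n elements
theorem pvBridge {β : Type} (xs : List Char) (n : Int) (hn : n ≤ (xs.length : Int))
    (g : β → Char → β) (init : β) :
    (PySem.List.pyRange 0 n 1).foldl (fun acc i => g acc (PySem.List.pyGetD xs i ' ')) init
      = (xs.take n.toNat).foldl g init := by
  by_cases h : n ≤ 0
  · rw [PySem.List.pyRange_one_eq_nil h]
    have h0 : n.toNat = 0 := by omega
    simp [h0]
  · have h' : 0 < n := by omega
    have hlen : ((xs.take n.toNat).length : Int) = n := by
      simp [List.length_take]; omega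
    have h1 : PySem.List.pyRange 0 n 1
        = PySem.List.pyRange 0 ((xs.take n.toNat).length : Int) 1 := by rw [hlen]
    rw [h1,
      PySem.List.foldl_congr_mem _ _
        (fun acc i => g acc (PySem.List.pyGetD (xs.take n.toNat) i ' ')) init ?_,
      PySem.List.foldl_pyRange_zero_pyGetD']
    intro acc i hi
    rw [PySem.List.mem_pyRange_one] at hi
    have h2 : i < ((xs.take n.toNat).length : Int) := hi.2
    have h3 : i < (xs.length : Int) := by simp [List.length_take] at h2 ⊢; omega
    simp only [PySem.List.pyGetD_eq_getElem xs ' ' hi.1 h3,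
        PySem.List.pyGetD_eq_getElem (List.take n.toNat xs) ' ' hi.1 h2]
    congr 1
    exact (List.getElem_take).symm

-- A's count array holds, in slot k, the number of processed characters of code k
theorem pvACount (cs : List Char) : ∀ (arr : List Int),
    (∀ c ∈ cs, c.toNat < arr.length) → ∀ (k : Nat),
    (cs.foldl pvAStep arr).getD k 0
      = arr.getD k 0 + (cs.countP (fun c => c.toNat == k) : Int) := by
  induction cs with
  | nil => intro arr _ k; simp
  | cons c cs ih =>
    intro arr hlt k
    have hc : c.toNat < arr.length := hlt c (by simp)
    simp only [List.foldl_cons]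
    have harr : pvAStep arr c = arr.set c.toNat (arr.getD c.toNat 0 + 1) := by
      simp [pvAStep, PySem.List.pySetD_natCast, PySem.List.pyGetD_natCast]
    rw [harr, ih _ (fun c' hc' => by
      rw [List.length_set]; exact hlt c' (List.mem_cons_of_mem _ hc'))]
    rw [List.countP_cons]
    by_cases hk : k = c.toNat
    · subst hk
      simp [List.getD_eq_getElem?_getD, hc]
      ring
    · simp [List.getD_eq_getElem?_getD, Ne.symm hk]

-- A's first loop never changes the array length
theorem pvALen (cs : List Char) : ∀ (arr : List Int),
    (cs.foldl pvAStep arr).length = arr.length := by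
  induction cs with
  | nil => intro arr; simp
  | cons c cs ih =>
    intro arr
    simp only [List.foldl_cons]
    rw [ih]
    simp [pvAStep]

-- an if-then-count fold is a filter length
theorem pvFoldCount {α : Type} (p : α → Prop) [DecidablePred p] :
    ∀ (l : List α) (m : Int),
    l.foldl (fun m x => if p x then m + 1 else m) m
      = m + ((l.filter (fun x => decide (p x))).length : Int) := by
  intro l
  induction l with
  | nil => intro m; simp
  | cons a l ih =>
    intro m
    simp only [List.foldl_cons, List.filter_cons]
    by_cases h : p a
    · simp [h, ih]; ring
    · simp [h, ih]

theorem pvCharIntInj : Function.Injective (fun c : Char => (c.toNat : Int)) := by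
  intro a b h
  have h1 : (a.toNat : Int) = (b.toNat : Int) := h
  have h2 : a.toNat = b.toNat := by exact_mod_cast h1
  exact Char.ext (UInt32.toNat_inj.mp h2)

-- B's scan over a sorted tail with prev = some q (q below every remaining element)
theorem pvScanSome : ∀ (l : List Char), l.Pairwise (· ≤ ·) →
    ∀ (q : Char), (∀ c ∈ l, q ≤ c) → ∀ (d : Int),
    (l.foldl pvBStep (d, some q)).1 = d + ((l.toFinset.erase q).card : Int) := by
  intro l
  induction l with
  | nil => intro _ q _ d; simp
  | cons c t ih =>
    intro hp q hq d
    have hpt : t.Pairwise (· ≤ ·) := hp.sublist (List.sublist_cons_self c t)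
    have hct : ∀ x ∈ t, c ≤ x := fun x hx => List.rel_of_pairwise_cons hp hx
    simp only [List.foldl_cons]
    by_cases hcq : c = q
    · subst hcq
      have : pvBStep (d, some c) c = (d, some c) := by simp [pvBStep]
      rw [this, ih hpt c hct d]
      simp [List.toFinset_cons, Finset.erase_insert_eq_erase]
    · have : pvBStep (d, some q) c = (d + 1, some c) := by
        simp [pvBStep, hcq]
      rw [this, ih hpt c hct (d + 1)]
      have hqc : q < c := lt_of_le_of_ne (hq c (by simp)) (Ne.symm hcq)
      have hqnot : q ∉ (c :: t).toFinset := by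
        simp only [List.toFinset_cons, Finset.mem_insert, List.mem_toFinset]
        rintro (rfl | hmem)
        · exact absurd rfl (ne_of_lt hqc)
        · exact absurd (hct q hmem) (not_le.mpr hqc)
      rw [Finset.erase_eq_of_notMem hqnot]
      have hcard : ((c :: t).toFinset.card : Int)
          = ((t.toFinset.erase c).card : Int) + 1 := by
        simp only [List.toFinset_cons]
        by_cases hcmem : c ∈ t.toFinset
        · rw [Finset.insert_eq_self.mpr hcmem]
          exact_mod_cast (Finset.card_erase_add_one hcmem).symm
        · rw [Finset.card_insert_of_notMem hcmem, Finset.erase_eq_of_notMem hcmem]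
          push_cast; ring
      rw [hcard]; ring

-- B's scan from the initial state counts the distinct characters of a sorted list
theorem pvScanNone (l : List Char) (hp : l.Pairwise (· ≤ ·)) :
    (l.foldl pvBStep (0, none)).1 = (l.toFinset.card : Int) := by
  cases l with
  | nil => simp
  | cons c t =>
    have hpt : t.Pairwise (· ≤ ·) := hp.sublist (List.sublist_cons_self c t)
    have hct : ∀ x ∈ t, c ≤ x := fun x hx => List.rel_of_pairwise_cons hp hx
    simp only [List.foldl_cons]
    have : pvBStep (0, none) c = (1, some c) := by simp [pvBStep]
    rw [this, pvScanSome t hpt c hct 1]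
    simp only [List.toFinset_cons]
    by_cases hcmem : c ∈ t.toFinset
    · rw [Finset.insert_eq_self.mpr hcmem]
      have := Finset.card_erase_add_one hcmem
      push_cast [← this]; ring
    · rw [Finset.card_insert_of_notMem hcmem, Finset.erase_eq_of_notMem hcmem]
      push_cast; ring

-- the number of distinct elements is the length of the PySem set
theorem pvSetCard (cs : List Char) :
    ((PySem.Set.ofList cs).length : Int) = (cs.toFinset.card : Int) := by
  have hnd : (PySem.Set.ofList cs : List Char).Nodup := PySem.Set.nodup_ofList cs
  have hfin : (PySem.Set.ofList cs : List Char).toFinset = cs.toFinset := by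
    ext x
    simp [List.mem_toFinset, PySem.Set.mem_ofList]
  rw [← hfin, List.toFinset_card_of_nodup hnd]

-- ===== VERDICT (by name: the statement is the Claim_ definition above) =====
theorem max_chars_spec : Claim_equal_max_chars := by
  intro text n hDom hPre
  unfold Spec_max_chars
  set cs : List Char := text.toList.take n.toNat with hcs
  have h256 : ∀ c ∈ cs, c.toNat < 256 := by
    intro c hc
    have hmem : c ∈ text.toList := List.mem_of_mem_take hc
    have hdc : pvDomChar c = true := by
      unfold Dom_max_chars at hDom
      rw [Bool.and_eq_true] at hDom
      have hstr := hDom.1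
      unfold pvDomStr at hstr
      exact (List.all_eq_true.1 hstr) c hmem
    unfold pvDomChar at hdc
    simp at hdc
    omega
  -- rewrite B: the comprehension is 'take', the sorted scan counts distinct elements
  have hB : max_chars_alt text n = (cs.toFinset.card : Int) := by
    unfold max_chars_alt
    have hmap : (PySem.List.pyRange 0 n 1).map
        (fun i => PySem.List.pyGetD text.toList i ' ') = cs := by
      have h1 : (PySem.List.pyRange 0 n 1).foldl
          (fun acc i => (fun acc c => acc ++ [c]) acc (PySem.List.pyGetD text.toList i ' '))
          ([] : List Char)
          = cs.foldl (fun acc c => acc ++ [c]) [] :=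
        pvBridge text.toList n hPre (fun acc c => acc ++ [c]) []
      rw [PySem.List.foldl_append_singleton_eq_map, PySem.List.foldl_append_singleton_eq_self] at h1
      simpa using h1
    rw [hmap]
    set s : List Char := PySem.List.sorted cs (fun c => c) false with hs
    have hperm : s.Perm cs := PySem.List.sorted_perm cs (fun c => c) false
    have hpair : s.Pairwise (· ≤ ·) := by
      have := PySem.List.sorted_pairwise cs (fun c => c)
      simpa [← hs] using this
    show (s.foldl pvBStep (0, none)).1 = (cs.toFinset.card : Int)
    rw [pvScanNone s hpair, List.toFinset_eq_of_perm s cs hperm]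
  -- rewrite A: the count array is per-code counts; the nonzero slots are the distinct codes
  have hA : max_chars text n = (cs.toFinset.card : Int) := by
    unfold max_chars
    have hfold : (PySem.List.pyRange 0 n 1).foldl
        (fun count i =>
          let o : Int := ((PySem.List.pyGetD text.toList i ' ').toNat : Int)
          PySem.List.pySetD count o (PySem.List.pyGetD count o 0 + 1))
        (List.replicate 256 0)
        = (PySem.List.pyRange 0 n 1).foldl
            (fun acc i => pvAStep acc (PySem.List.pyGetD text.toList i ' '))
            (List.replicate 256 0) := rfl
    rw [hfold, pvBridge text.toList n hPre pvAStep (List.replicate 256 0), ← hcs]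
    set arr : List Int := cs.foldl pvAStep (List.replicate 256 0) with harr
    have hlen : arr.length = 256 := by
      rw [harr, pvALen]; simp
    have hslot : ∀ (k : Nat), k < 256 →
        arr.getD k 0 = (cs.countP (fun c => c.toNat == k) : Int) := by
      intro k hk
      rw [harr, pvACount cs (List.replicate 256 0) (by simpa using h256) k]
      have h0 : (List.replicate 256 (0:Int)).getD k 0 = 0 := by
        rw [List.getD_eq_getElem?_getD, List.getElem?_replicate]
        simp [hk]
      rw [h0, zero_add]
    rw [pvFoldCount (fun i => PySem.List.pyGetD arr i 0 ≠ 0) (PySem.List.pyRange 0 256 1) 0]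
    -- the filtered range is a permutation of the distinct characters' codes
    have hperm : ((PySem.List.pyRange 0 256 1).filter
          (fun i => decide (PySem.List.pyGetD arr i 0 ≠ 0))).Perm
        ((PySem.Set.ofList cs).map (fun c => (c.toNat : Int))) := by
      rw [List.perm_ext_iff_of_nodup
        (List.Nodup.filter _ (PySem.List.nodup_pyRange_one 0 256))
        (List.Nodup.map pvCharIntInj (PySem.Set.nodup_ofList cs))]
      intro x
      rw [List.mem_filter, PySem.List.mem_pyRange_one]
      simp only [List.mem_map, PySem.Set.mem_ofList, decide_eq_true_eq]
      constructor
      · rintro ⟨⟨hx0, hx256⟩, hne⟩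
        have hx : PySem.List.pyGetD arr x 0 = arr.getD x.toNat 0 := by
          rw [PySem.List.pyGetD_eq_getElem arr 0 hx0 (by omega),
              List.getD_eq_getElem?_getD, List.getElem?_eq_getElem (by omega)]
          simp
        rw [hx, hslot x.toNat (by omega)] at hne
        have : cs.countP (fun c => c.toNat == x.toNat) ≠ 0 := by
          intro h0; rw [h0] at hne; simp at hne
        rw [Ne, List.countP_eq_zero] at this
        simp only [not_forall, exists_prop, not_not] at this
        obtain ⟨c, hc, hcx⟩ := this
        exact ⟨c, hc, by simp at hcx; omega⟩
      · rintro ⟨c, hc, rfl⟩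
        have hc256 := h256 c hc
        have hx0 : (0:Int) ≤ (c.toNat : Int) := by positivity
        have hx256 : ((c.toNat : Int)) < 256 := by exact_mod_cast hc256
        refine ⟨⟨hx0, hx256⟩, ?_⟩
        have hx : PySem.List.pyGetD arr ((c.toNat : Int)) 0 = arr.getD c.toNat 0 := by
          rw [PySem.List.pyGetD_eq_getElem arr 0 hx0 (by omega),
              List.getD_eq_getElem?_getD, List.getElem?_eq_getElem (by omega)]
          simp
        rw [hx, hslot c.toNat hc256]
        have hpos : 0 < cs.countP (fun c' => c'.toNat == c.toNat) := by
          rw [List.countP_pos_iff]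
          exact ⟨c, hc, by simp⟩
        exact_mod_cast hpos.ne'
    rw [hperm.length_eq, List.length_map]
    simpa using pvSetCard cs
  rw [hA, hB]
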